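-- pv_equiv track=rewrite | github.com/IslamDNJ/pythonKyberDrome | venv/Lib/pioneer_sdk-main/КЭМЗ_3.py | _optimize_points
-- ===== SOURCE A (Python) =====
-- def _optimize_points(source: list):
--     """Оптимизировать маршрут для дрона, то есть убрать лишние точки, через которые и так лежит маршрут"""
--     assert len(source) > 0
--
--     result = [source[0]]
--     if len(source) >= 2:
--         vec_x, vec_y = source[0][0] - source[1][0], source[0][1] - source[1][1]
--         for index in range(1, len(source)):
--             if index == len(source) - 1:
--
--                 result.append(source[index])
--             else:
--
--                 new_vec_x = source[index][0] - source[index + 1][0]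
--                 new_vec_y = source[index][1] - source[index + 1][1]
--                 if new_vec_y != vec_y or new_vec_x != vec_x:
--                     vec_x, vec_y = new_vec_x, new_vec_y
--                     result.append(source[index])
--
--     return result
-- ===== SOURCE B (Python) =====
-- def _optimize_points(source: list):
--     """Оптимизировать маршрут для дрона, то есть убрать лишние точки, через которые и так лежит маршрут"""
--     assert len(source) > 0
--
--     def rec(prev, rest):
--         # rest is nonempty; keep rest[0] iff it is the last point or the route bends at it
--         if len(rest) == 1:
--             return [rest[0]]
--         b, c = rest[0], rest[1]
--         tail = rec(b, rest[1:])
--         if (b[0] - c[0], b[1] - c[1]) != (prev[0] - b[0], prev[1] - b[1]):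
--             return [b] + tail
--         return tail
--
--     if len(source) == 1:
--         return [source[0]]
--     return [source[0]] + rec(source[0], source[1:])
-- ===== Notes on version B (the rewrite author's own statement) =====
-- stated objective: alternative
-- what changed: A's iterative index loop with a mutable running direction vector and a last-index special case is replaced by structural recursion on the tail of the route: each point is kept iff it is the last one or the delta to its successor differs from the delta from its predecessor, recomputed locally from the adjacent triple with no carried state.
import Mathlib
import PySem

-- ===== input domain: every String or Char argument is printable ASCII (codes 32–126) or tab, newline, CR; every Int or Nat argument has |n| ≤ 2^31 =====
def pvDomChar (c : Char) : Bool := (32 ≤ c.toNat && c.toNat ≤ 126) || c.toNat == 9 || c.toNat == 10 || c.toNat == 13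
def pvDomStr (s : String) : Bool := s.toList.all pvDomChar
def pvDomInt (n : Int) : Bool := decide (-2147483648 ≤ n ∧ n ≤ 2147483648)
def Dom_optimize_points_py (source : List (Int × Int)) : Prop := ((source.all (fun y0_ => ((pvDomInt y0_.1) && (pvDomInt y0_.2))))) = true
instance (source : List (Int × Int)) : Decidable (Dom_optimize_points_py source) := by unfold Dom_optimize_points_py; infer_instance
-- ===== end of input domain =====

-- B replaces A's iterative index loop (mutable running vector + last-index special case) by
-- structural recursion on the tail: keep a point iff it is last or the adjacent triple bends
-- (objective: alternative decomposition). Return values agree on Pre_ (nonempty input).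

-- ===== PORT A =====
-- loop body of A's 'for index in range(1, len(source))', state = (vec, result)
def pvStepA (source : List (Int × Int)) (st : (Int × Int) × List (Int × Int)) (index : Int) :
    (Int × Int) × List (Int × Int) :=
  if index = (source.length : Int) - 1 then
    (st.1, st.2 ++ [PySem.List.pyGetD source index (0, 0)])
  else
    let pi := PySem.List.pyGetD source index (0, 0)
    let pn := PySem.List.pyGetD source (index + 1) (0, 0)
    let nvx := pi.1 - pn.1
    let nvy := pi.2 - pn.2
    if nvy ≠ st.1.2 ∨ nvx ≠ st.1.1 then ((nvx, nvy), st.2 ++ [pi]) else st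

def optimize_points_py (source : List (Int × Int)) : List (Int × Int) :=
  match source with
  | [] => []  -- 'assert len(source) > 0' fails here (AssertionError); excluded by Pre_
  | p0 :: _ =>
    let result := [p0]
    if 2 ≤ source.length then
      let p1 := PySem.List.pyGetD source 1 (0, 0)
      ((PySem.List.pyRange 1 (source.length : Int) 1).foldl (pvStepA source)
        ((p0.1 - p1.1, p0.2 - p1.2), result)).2
    else result

-- ===== PORT B =====
-- Source B's inner 'rec(prev, rest)': structural recursion, rest nonempty
def pvRecB (prev : Int × Int) : List (Int × Int) → List (Int × Int)
  | [] => []  -- unreachable: rec is only called with nonempty rest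
  | [b] => [b]
  | b :: c :: t =>
    let tail := pvRecB b (c :: t)
    if (b.1 - c.1, b.2 - c.2) ≠ (prev.1 - b.1, prev.2 - b.2) then [b] ++ tail else tail

def optimize_points_py_alt (source : List (Int × Int)) : List (Int × Int) :=
  match source with
  | [] => []  -- 'assert len(source) > 0' fails here (AssertionError); excluded by Pre_
  | [p] => [p]
  | p0 :: tail => [p0] ++ pvRecB p0 tail

-- ===== PRECONDITION & SPEC =====
-- Pre_ excludes the empty list, on which A's 'assert len(source) > 0' raises AssertionError.
def Pre_optimize_points_py (source : List (Int × Int)) : Prop := source ≠ []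
instance (source : List (Int × Int)) : Decidable (Pre_optimize_points_py source) := by
  unfold Pre_optimize_points_py; infer_instance
def pvWitness_optimize_points_py : (List (Int × Int)) := [(0, 0), (1, 1), (2, 2), (3, 5)]
def Spec_optimize_points_py (source : List (Int × Int)) (out : List (Int × Int)) : Prop := out = optimize_points_py_alt source
instance (source : List (Int × Int)) (out : List (Int × Int)) : Decidable (Spec_optimize_points_py source out) := by unfold Spec_optimize_points_py; infer_instance

-- ===== CLAIM (what is proved, stated in full; the proofs are below) =====
def Claim_equal_optimize_points_py : Prop := ∀ (source : List (Int × Int)), Dom_optimize_points_py source → Pre_optimize_points_py source → Spec_optimize_points_py source (optimize_points_py source)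

-- ===== LEMMAS AND PROOFS =====

def pvDelta (a b : Int × Int) : Int × Int := (a.1 - b.1, a.2 - b.2)

-- common characterisation of the kept tail: given points a, b opening the remaining route,
-- keep b iff its outgoing delta differs from the incoming one; the last point is kept.
def pvCore (a b : Int × Int) : List (Int × Int) → List (Int × Int)
  | [] => [b]
  | c :: rs => if pvDelta b c ≠ pvDelta a b then b :: pvCore b c rs else pvCore b c rs

lemma pvGetAt (src : List (Int × Int)) (k j : Nat) (x : Int × Int)
    (h : (src.drop k)[j]? = some x) :
    PySem.List.pyGetD src ((k : Int) + (j : Int)) (0, 0) = x := by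
  rw [List.getElem?_drop] at h
  have : ((k : Int) + (j : Int)) = ((k + j : Nat) : Int) := by push_cast; ring
  rw [this]
  simp only [PySem.List.pyGetD, PySem.List.pyGet?_natCast, h]
  rfl

lemma pvLoopA (rest : List (Int × Int)) :
    ∀ (src : List (Int × Int)) (a b : Int × Int) (k : Nat) (res : List (Int × Int)),
    src.drop k = a :: b :: rest →
    (((PySem.List.pyRange ((k : Int) + 1) (src.length : Int) 1).foldl (pvStepA src)
      (pvDelta a b, res)).2 : List (Int × Int)) = res ++ pvCore a b rest := by
  induction rest with
  | nil =>
    intro src a b k res hdrop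
    have hlen : src.length = k + 2 := by
      have := congrArg List.length hdrop
      simp [List.length_drop] at this
      omega
    have hb : PySem.List.pyGetD src ((k : Int) + 1) (0, 0) = b := by
      have := pvGetAt src k 1 b (by rw [hdrop]; rfl)
      simpa using this
    have hr : PySem.List.pyRange ((k : Int) + 1) (src.length : Int) 1 = [((k : Int) + 1)] := by
      rw [hlen, PySem.List.pyRange_one]
      rw [show (((k + 2 : Nat) : Int) - ((k : Int) + 1)).toNat = 1 by push_cast; omega]
      simp
    rw [hr]
    simp only [List.foldl_cons, List.foldl_nil, pvStepA]
    rw [if_pos (show ((k : Int) + 1) = ((src.length : Int)) - 1 by rw [hlen]; push_cast; ring)]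
    simp [hb, pvCore]
  | cons c rs ih =>
    intro src a b k res hdrop
    have hlen : src.length = k + 3 + rs.length := by
      have := congrArg List.length hdrop
      simp [List.length_drop] at this
      omega
    have hb : PySem.List.pyGetD src ((k : Int) + 1) (0, 0) = b := by
      have := pvGetAt src k 1 b (by rw [hdrop]; rfl)
      simpa using this
    have hc : PySem.List.pyGetD src ((k : Int) + 1 + 1) (0, 0) = c := by
      have := pvGetAt src k 2 c (by rw [hdrop]; rfl)
      have e : (k : Int) + 1 + 1 = (k : Int) + ((2 : Nat) : Int) := by push_cast; ring
      rw [e]; exact this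
    have hdrop' : src.drop (k + 1) = b :: c :: rs := by
      have := congrArg (List.drop 1) hdrop
      rw [List.drop_drop] at this
      simpa [Nat.add_comm] using this
    have hcons : PySem.List.pyRange ((k : Int) + 1) (src.length : Int) 1
        = ((k : Int) + 1) :: PySem.List.pyRange ((k : Int) + 1 + 1) (src.length : Int) 1 :=
      PySem.List.pyRange_one_cons (by rw [hlen]; push_cast; omega)
    have hne : ¬ (((k : Int) + 1) = (src.length : Int) - 1) := by rw [hlen]; push_cast; omega
    have hstep : pvStepA src (pvDelta a b, res) ((k : Int) + 1)
        = (if pvDelta b c ≠ pvDelta a b then (pvDelta b c, res ++ [b]) else (pvDelta a b, res)) := by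
      simp only [pvStepA, if_neg hne, hb, hc]
      by_cases hd : pvDelta b c = pvDelta a b
      · have h1 : b.1 - c.1 = (pvDelta a b).1 := by rw [← hd]; rfl
        have h2 : b.2 - c.2 = (pvDelta a b).2 := by rw [← hd]; rfl
        simp [hd, h1, h2]
      · have hor : b.2 - c.2 ≠ (pvDelta a b).2 ∨ b.1 - c.1 ≠ (pvDelta a b).1 := by
          by_contra hcon
          push Not at hcon
          exact hd (Prod.ext hcon.2 hcon.1)
        simp only [if_pos hor, if_pos hd]
        rfl
    have ecast : (((k + 1 : Nat)) : Int) = (k : Int) + 1 := by push_cast; ring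
    have hih := ih src b c (k + 1) ; rw [ecast] at hih
    rw [hcons, List.foldl_cons, hstep]
    by_cases hd : pvDelta b c = pvDelta a b
    · rw [if_neg (by simpa using hd)]
      rw [← hd, hih res hdrop']
      simp [pvCore, hd]
    · rw [if_pos hd]
      rw [hih (res ++ [b]) hdrop']
      simp [pvCore, hd]

lemma pvA_eq (p0 p1 : Int × Int) (rest : List (Int × Int)) :
    optimize_points_py (p0 :: p1 :: rest) = p0 :: pvCore p0 p1 rest := by
  have h := pvLoopA rest (p0 :: p1 :: rest) p0 p1 0 [p0] (by simp)
  norm_num at h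
  have hp1 : PySem.List.pyGetD (p0 :: p1 :: rest) 1 (0, 0) = p1 := by
    simp [PySem.List.pyGetD, PySem.List.pyGet?, PySem.List.pyIdx?]
  show ((PySem.List.pyRange 1 ((p0 :: p1 :: rest).length : Int) 1).foldl
      (pvStepA (p0 :: p1 :: rest))
      ((p0.1 - (PySem.List.pyGetD (p0 :: p1 :: rest) 1 (0, 0)).1,
        p0.2 - (PySem.List.pyGetD (p0 :: p1 :: rest) 1 (0, 0)).2), [p0])).2
    = p0 :: pvCore p0 p1 rest
  rw [hp1]
  exact h

lemma pvRecB_eq_core (rest : List (Int × Int)) :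
    ∀ (a b : Int × Int), pvRecB a (b :: rest) = pvCore a b rest := by
  induction rest with
  | nil => intro a b; rfl
  | cons c rs ih =>
    intro a b
    show (if (b.1 - c.1, b.2 - c.2) ≠ (a.1 - b.1, a.2 - b.2)
          then [b] ++ pvRecB b (c :: rs) else pvRecB b (c :: rs))
        = pvCore a b (c :: rs)
    rw [ih b c]
    by_cases hd : pvDelta b c = pvDelta a b
    · have hd' : (b.1 - c.1, b.2 - c.2) = (a.1 - b.1, a.2 - b.2) := hd
      simp [pvCore, hd, hd']
    · have hd' : ¬ ((b.1 - c.1, b.2 - c.2) = (a.1 - b.1, a.2 - b.2)) := hd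
      simp [pvCore, hd, hd']

-- ===== VERDICT (by name: the statement is the Claim_ definition above) =====
theorem optimize_points_py_spec : Claim_equal_optimize_points_py := by
  intro source _ hpre
  unfold Spec_optimize_points_py
  match source with
  | [] => exact absurd rfl hpre
  | [p] => rfl
  | p0 :: p1 :: rest =>
    show optimize_points_py (p0 :: p1 :: rest) = [p0] ++ pvRecB p0 (p1 :: rest)
    rw [pvA_eq, pvRecB_eq_core]
    rfl
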